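-- pv_equiv track=rewrite | github.com/IvailoAtanasov/opsctl | channels.py | get_target_child_channels
-- ===== SOURCE A (Python) =====
-- def get_target_child_channels(subscribable_child_channels, subscribed_base_channel, child_channel):#child channel is user input i.e. fdom
--     target_child_channels = []
--     for repo in subscribable_child_channels:
--         #SLES11
--         if '11' in subscribed_base_channel:
--             repo_list = [child_channel, 'pool', 'sles11sp4-in']
--             if any(substring in repo for substring in repo_list):
--                     target_child_channels.append(repo)
--         #RHEL
--         elif 'rhel' in subscribed_base_channel or 'redhat' in subscribed_base_channel:
--             if '7' in subscribed_base_channel: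
--                 repo_list = ['cust','rhel7-in-x86_64-all', 'rhel7-res7-suse-manager-tools-x86_64', 'rhel7-in-dvd-suse-rhel7.1-x86_64', 'rhel7-in-x86_64-rhel7']
--                 if child_channel in repo or any(substring == repo for substring in repo_list):
--                     target_child_channels.append(repo)
--
--             elif '6' in subscribed_base_channel:
--                 if child_channel in repo or repo.startswith('redhat-6-pool-x86_64'):
--                     target_child_channels.append(repo)
--
--             else:
--                 repo_list = [child_channel, 'dvd', 'pool']
--                 if any(substring in repo for substring in repo_list):
--                     target_child_channels.append(repo)
--
--         #SLES12/15
--         else: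
--             if child_channel in repo or 'pool' in repo:
--                 target_child_channels.append(repo)
--
--     return target_child_channels
-- ===== SOURCE B (Python) =====
-- def get_target_child_channels(subscribable_child_channels, subscribed_base_channel, child_channel):
--     # Data-driven staged passes: derive a rule table (substring/exact/prefix patterns)
--     # from the base channel, collect the matching indices per pattern into a set,
--     # then emit the channels in their original order.
--     if '11' in subscribed_base_channel:
--         substrings, exacts, prefixes = [child_channel, 'pool', 'sles11sp4-in'], [], []
--     elif 'rhel' in subscribed_base_channel or 'redhat' in subscribed_base_channel:
--         if '7' in subscribed_base_channel:
--             substrings = [child_channel]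
--             exacts = ['cust', 'rhel7-in-x86_64-all', 'rhel7-res7-suse-manager-tools-x86_64',
--                       'rhel7-in-dvd-suse-rhel7.1-x86_64', 'rhel7-in-x86_64-rhel7']
--             prefixes = []
--         elif '6' in subscribed_base_channel:
--             substrings, exacts, prefixes = [child_channel], [], ['redhat-6-pool-x86_64']
--         else:
--             substrings, exacts, prefixes = [child_channel, 'dvd', 'pool'], [], []
--     else:
--         substrings, exacts, prefixes = [child_channel, 'pool'], [], []
--     matched = set()
--     for s in substrings:
--         matched.update(i for i, repo in enumerate(subscribable_child_channels) if s in repo)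
--     matched.update(i for i, repo in enumerate(subscribable_child_channels) if repo in exacts)
--     for p in prefixes:
--         matched.update(i for i, repo in enumerate(subscribable_child_channels) if repo.startswith(p))
--     return [repo for i, repo in enumerate(subscribable_child_channels) if i in matched]
-- ===== Notes on version B (the rewrite author's own statement) =====
-- stated objective: alternative
-- what changed: B replaces A's single pass with per-repo branch re-testing by a data-driven design: it derives a rule table (substring/exact-match/prefix patterns) from the base channel, runs staged passes that collect the matching indices per pattern into a set, and finally emits the matched channels in their original order.
import Mathlib
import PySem

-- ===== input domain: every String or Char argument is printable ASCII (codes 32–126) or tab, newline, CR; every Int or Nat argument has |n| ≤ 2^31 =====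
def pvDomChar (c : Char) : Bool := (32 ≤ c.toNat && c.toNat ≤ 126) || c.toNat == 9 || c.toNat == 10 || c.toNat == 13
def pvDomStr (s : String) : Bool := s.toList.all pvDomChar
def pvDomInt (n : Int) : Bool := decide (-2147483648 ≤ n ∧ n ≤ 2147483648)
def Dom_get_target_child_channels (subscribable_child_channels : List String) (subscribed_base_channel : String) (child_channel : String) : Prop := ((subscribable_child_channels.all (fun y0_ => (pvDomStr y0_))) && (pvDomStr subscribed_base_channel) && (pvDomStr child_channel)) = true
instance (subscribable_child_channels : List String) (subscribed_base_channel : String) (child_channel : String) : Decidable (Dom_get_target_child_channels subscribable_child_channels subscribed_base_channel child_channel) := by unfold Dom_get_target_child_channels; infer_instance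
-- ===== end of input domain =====

-- B is data-driven: it derives a rule table (substring/exact/prefix patterns) from the base
-- channel, collects matching indices per pattern in staged passes into a set, then emits the
-- channels in original order (objective: alternative; same O(n·m) cost, different structure).

-- ===== PORT A =====
def get_target_child_channels (subscribable_child_channels : List String) (subscribed_base_channel : String) (child_channel : String) : List String :=
  subscribable_child_channels.foldl (fun target_child_channels repo =>
    -- SLES11
    if PySem.Str.isIn "11" subscribed_base_channel then
      if ([child_channel, "pool", "sles11sp4-in"]).any (fun substring => PySem.Str.isIn substring repo) then
        target_child_channels ++ [repo]
      else target_child_channels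
    -- RHEL
    else if PySem.Str.isIn "rhel" subscribed_base_channel || PySem.Str.isIn "redhat" subscribed_base_channel then
      if PySem.Str.isIn "7" subscribed_base_channel then
        if PySem.Str.isIn child_channel repo ||
            (["cust", "rhel7-in-x86_64-all", "rhel7-res7-suse-manager-tools-x86_64",
              "rhel7-in-dvd-suse-rhel7.1-x86_64", "rhel7-in-x86_64-rhel7"]).any (fun substring => substring == repo) then
          target_child_channels ++ [repo]
        else target_child_channels
      else if PySem.Str.isIn "6" subscribed_base_channel then
        if PySem.Str.isIn child_channel repo || PySem.Str.startswith repo "redhat-6-pool-x86_64" then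
          target_child_channels ++ [repo]
        else target_child_channels
      else
        if ([child_channel, "dvd", "pool"]).any (fun substring => PySem.Str.isIn substring repo) then
          target_child_channels ++ [repo]
        else target_child_channels
    -- SLES12/15
    else
      if PySem.Str.isIn child_channel repo || PySem.Str.isIn "pool" repo then
        target_child_channels ++ [repo]
      else target_child_channels) []

-- ===== PORT B =====
-- matching stage of Source B: staged passes collecting matching indices into a set, then an
-- ordered emit (exact port of the code after the rule table is chosen)
def pvMatchStage (xs : List String) (substrings exacts prefixes : List String) : List String :=
  let idx := PySem.List.enumerate xs
  let m1 : PySem.Set Int :=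
    substrings.foldl (fun m s =>
      PySem.Set.update m ((idx.filter (fun p => PySem.Str.isIn s p.2)).map (·.1))) PySem.Set.empty
  let m2 := PySem.Set.update m1 ((idx.filter (fun p => exacts.contains p.2)).map (·.1))
  let matched :=
    prefixes.foldl (fun m s =>
      PySem.Set.update m ((idx.filter (fun p => PySem.Str.startswith p.2 s)).map (·.1))) m2
  (idx.filter (fun p => PySem.Set.contains matched p.1)).map (·.2)

def get_target_child_channels_alt (subscribable_child_channels : List String) (subscribed_base_channel : String) (child_channel : String) : List String :=
  let rules : List String × List String × List String :=
    if PySem.Str.isIn "11" subscribed_base_channel then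
      ([child_channel, "pool", "sles11sp4-in"], [], [])
    else if PySem.Str.isIn "rhel" subscribed_base_channel || PySem.Str.isIn "redhat" subscribed_base_channel then
      if PySem.Str.isIn "7" subscribed_base_channel then
        ([child_channel],
         ["cust", "rhel7-in-x86_64-all", "rhel7-res7-suse-manager-tools-x86_64",
          "rhel7-in-dvd-suse-rhel7.1-x86_64", "rhel7-in-x86_64-rhel7"], [])
      else if PySem.Str.isIn "6" subscribed_base_channel then
        ([child_channel], [], ["redhat-6-pool-x86_64"])
      else
        ([child_channel, "dvd", "pool"], [], [])
    else
      ([child_channel, "pool"], [], [])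
  pvMatchStage subscribable_child_channels rules.1 rules.2.1 rules.2.2

-- ===== PRECONDITION & SPEC =====
def Spec_get_target_child_channels (subscribable_child_channels : List String) (subscribed_base_channel : String) (child_channel : String) (out : List String) : Prop := out = get_target_child_channels_alt subscribable_child_channels subscribed_base_channel child_channel
instance (subscribable_child_channels : List String) (subscribed_base_channel : String) (child_channel : String) (out : List String) : Decidable (Spec_get_target_child_channels subscribable_child_channels subscribed_base_channel child_channel out) := by unfold Spec_get_target_child_channels; infer_instance

-- ===== CLAIM (what is proved, stated in full; the proofs are below) =====
def Claim_equal_get_target_child_channels : Prop := ∀ (subscribable_child_channels : List String) (subscribed_base_channel : String) (child_channel : String), Dom_get_target_child_channels subscribable_child_channels subscribed_base_channel child_channel → Spec_get_target_child_channels subscribable_child_channels subscribed_base_channel child_channel (get_target_child_channels subscribable_child_channels subscribed_base_channel child_channel)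

-- ===== LEMMAS AND PROOFS =====

theorem mem_foldl_update {α β : Type} [BEq α] [LawfulBEq α] (l : List β) (f : β → List α)
    (m0 : PySem.Set α) (y : α) :
    y ∈ l.foldl (fun m s => PySem.Set.update m (f s)) m0 ↔ y ∈ m0 ∨ ∃ s ∈ l, y ∈ f s := by
  induction l generalizing m0 with
  | nil => simp
  | cons a l ih =>
    simp only [List.foldl_cons, ih, PySem.Set.mem_update, List.mem_cons]
    constructor
    · rintro (⟨h | h⟩ | ⟨s, hs, h⟩)
      · exact Or.inl h
      · exact Or.inr ⟨a, Or.inl rfl, h⟩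
      · exact Or.inr ⟨s, Or.inr hs, h⟩
    · rintro (h | ⟨s, rfl | hs, h⟩)
      · exact Or.inl (Or.inl h)
      · exact Or.inl (Or.inr h)
      · exact Or.inr ⟨s, hs, h⟩

theorem enumerate_fst_inj {α : Type} (xs : List α) (s : Int) :
    ∀ p ∈ PySem.List.enumerate xs s, ∀ q ∈ PySem.List.enumerate xs s, p.1 = q.1 → p = q := by
  intro p hp q hq h
  rw [PySem.List.mem_enumerate_iff] at hp hq
  obtain ⟨k1, h1, rfl⟩ := hp
  obtain ⟨k2, h2, rfl⟩ := hq
  simp only at h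
  have : k1 = k2 := by omega
  subst this; rfl

theorem mem_map_fst_filter {α : Type} (xs : List α) (s : Int) (q : Int × α → Bool)
    (p : Int × α) (hp : p ∈ PySem.List.enumerate xs s) :
    p.1 ∈ ((PySem.List.enumerate xs s).filter q).map (·.1) ↔ q p = true := by
  constructor
  · intro h
    simp only [List.mem_map, List.mem_filter] at h
    obtain ⟨p', ⟨hp', hq'⟩, h1⟩ := h
    have := enumerate_fst_inj xs s p' hp' p hp h1
    subst this; exact hq'
  · intro h
    exact List.mem_map.mpr ⟨p, List.mem_filter.mpr ⟨hp, h⟩, rfl⟩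

theorem map_snd_filter_snd {α : Type} (xs : List α) (s : Int) (g : α → Bool) :
    ((PySem.List.enumerate xs s).filter (fun p => g p.2)).map (·.2) = xs.filter g := by
  induction xs generalizing s with
  | nil => rfl
  | cons a l ih =>
    simp only [PySem.List.enumerate_cons, List.filter_cons]
    by_cases hg : g a
    · simp [hg, ih]
    · simp [hg, ih]

theorem matched_contains (xs sub ex pf : List String) (p : Int × String)
    (hp : p ∈ PySem.List.enumerate xs 0) :
    PySem.Set.contains
      (pf.foldl (fun m s =>
          PySem.Set.update m (((PySem.List.enumerate xs 0).filter (fun p => PySem.Str.startswith p.2 s)).map (·.1)))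
        (PySem.Set.update
          (sub.foldl (fun m s =>
              PySem.Set.update m (((PySem.List.enumerate xs 0).filter (fun p => PySem.Str.isIn s p.2)).map (·.1)))
            PySem.Set.empty)
          (((PySem.List.enumerate xs 0).filter (fun p => ex.contains p.2)).map (·.1)))) p.1
    = (sub.any (fun s => PySem.Str.isIn s p.2) || ex.contains p.2
        || pf.any (fun s => PySem.Str.startswith p.2 s)) := by
  rw [Bool.eq_iff_iff, PySem.Set.contains_iff, mem_foldl_update, PySem.Set.mem_update,
    mem_foldl_update]
  constructor
  · rintro (((hemp | ⟨s, hs, h⟩) | h) | ⟨s, hs, h⟩)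
    · exact absurd hemp (by simp [PySem.Set.empty])
    · have := (mem_map_fst_filter xs 0 _ p hp).mp h
      simp only [Bool.or_eq_true, List.any_eq_true]
      exact Or.inl (Or.inl ⟨s, hs, this⟩)
    · have := (mem_map_fst_filter xs 0 _ p hp).mp h
      simp only [Bool.or_eq_true]
      exact Or.inl (Or.inr this)
    · have := (mem_map_fst_filter xs 0 _ p hp).mp h
      simp only [Bool.or_eq_true, List.any_eq_true]
      exact Or.inr ⟨s, hs, this⟩
  · intro h
    simp only [Bool.or_eq_true, List.any_eq_true] at h
    rcases h with (⟨s, hs, h⟩ | h) | ⟨s, hs, h⟩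
    · exact Or.inl (Or.inl (Or.inr ⟨s, hs, (mem_map_fst_filter xs 0 _ p hp).mpr h⟩))
    · exact Or.inl (Or.inr ((mem_map_fst_filter xs 0 _ p hp).mpr h))
    · exact Or.inr ⟨s, hs, (mem_map_fst_filter xs 0 _ p hp).mpr h⟩

theorem pvMatchStage_eq_filter (xs : List String) (sub ex pf : List String) :
    pvMatchStage xs sub ex pf
      = xs.filter (fun r => sub.any (fun s => PySem.Str.isIn s r) || ex.contains r
          || pf.any (fun s => PySem.Str.startswith r s)) := by
  simp only [pvMatchStage]
  rw [List.filter_congr (fun p hp => matched_contains xs sub ex pf p hp)]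
  exact map_snd_filter_snd xs 0 (fun r => sub.any (fun s => PySem.Str.isIn s r) || ex.contains r || pf.any (fun s => PySem.Str.startswith r s))

theorem str_beq_comm_decide (a b : String) : (a == b) = decide (b = a) := by
  rw [Bool.eq_iff_iff, beq_iff_eq, decide_eq_true_iff]; exact eq_comm

theorem get_target_equal (subscribable_child_channels : List String) (subscribed_base_channel : String) (child_channel : String) :
    get_target_child_channels subscribable_child_channels subscribed_base_channel child_channel
    = get_target_child_channels_alt subscribable_child_channels subscribed_base_channel child_channel := by
  unfold get_target_child_channels get_target_child_channels_alt
  split_ifs <;>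
    simp only [*, PySem.List.foldl_append_if_eq_filter, pvMatchStage_eq_filter] <;>
    (apply List.filter_congr; intro repo _;
     simp [str_beq_comm_decide, List.contains_eq_mem])

-- ===== VERDICT (by name: the statement is the Claim_ definition above) =====
theorem get_target_child_channels_spec : Claim_equal_get_target_child_channels := by
  intro l b c _
  exact get_target_equal l b c
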